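-- pv_equiv track=rewrite | github.com/tawanchaiii/01204111_63 | tewExam3.py | readMat
-- ===== SOURCE A (Python) =====
-- def readMat(a):
--     mat,op,line=[],[],[]
--     for i in a:
--         if i in [['+'],['*'],['-']]:
--             mat.append(line)
--             line=[]
--             op.append(i)
--         else :line.append(i)
--     if len(line)>0: mat.append(line)
--     return mat,op
-- ===== SOURCE B (Python) =====
-- def readMat(a):
--     hits = [(k, x) for k, x in enumerate(a) if x in (['+'], ['*'], ['-'])]
--     op = [x for _, x in hits]
--     mat, prev = [], 0
--     for k, _ in hits:
--         mat.append(a[prev:k])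
--         prev = k + 1
--     tail = a[prev:]
--     if tail:
--         mat.append(tail)
--     return mat, op
-- ===== Notes on version B (the rewrite author's own statement) =====
-- stated objective: alternative
-- what changed: Replaces A's fused accumulate-and-reset loop with a two-phase scan: first collect the operator positions via enumerate+filter, then rebuild the matrix segments as slices a[prev:k] between consecutive operator indices.
import Mathlib
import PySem

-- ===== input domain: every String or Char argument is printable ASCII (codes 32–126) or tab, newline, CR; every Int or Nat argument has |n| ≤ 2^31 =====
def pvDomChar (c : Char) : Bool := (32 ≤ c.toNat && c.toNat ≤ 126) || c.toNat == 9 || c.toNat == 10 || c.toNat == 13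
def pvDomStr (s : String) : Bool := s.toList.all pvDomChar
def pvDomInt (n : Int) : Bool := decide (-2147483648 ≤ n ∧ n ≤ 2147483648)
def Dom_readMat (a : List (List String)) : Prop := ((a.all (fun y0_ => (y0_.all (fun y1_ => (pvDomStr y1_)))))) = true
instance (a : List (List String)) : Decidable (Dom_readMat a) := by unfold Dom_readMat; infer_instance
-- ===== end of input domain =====

-- B replaces A's fused accumulate-and-reset loop by a two-phase scan (collect operator
-- positions, then cut the segments out as slices); objective: alternative decomposition.

-- ===== PORT A =====
-- the operator-token test i in [['+'],['*'],['-']] (shared verbatim by B)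
def pvIsOpA (i : List String) : Bool := i == ["+"] || i == ["*"] || i == ["-"]

-- the loop body of A, over state (mat, op, line)
def pvStepA (s : List (List (List String)) × List (List String) × List (List String))
    (i : List String) : List (List (List String)) × List (List String) × List (List String) :=
  if pvIsOpA i then (s.1 ++ [s.2.2], s.2.1 ++ [i], [])
  else (s.1, s.2.1, s.2.2 ++ [i])

def readMat (a : List (List String)) : List (List (List String)) × List (List String) :=
  let s := a.foldl pvStepA ([], [], [])
  (if s.2.2.length > 0 then s.1 ++ [s.2.2] else s.1, s.2.1)

-- ===== PORT B =====
-- x in (['+'], ['*'], ['-']) — the same token test as A's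
-- the loop body of B, over state (mat, prev); appends the slice a[prev:k]
def pvStepB (a : List (List String)) (s : List (List (List String)) × Int)
    (p : Int × List String) : List (List (List String)) × Int :=
  (s.1 ++ [PySem.List.slice a (some s.2) (some p.1)], p.1 + 1)

def readMat_alt (a : List (List String)) : List (List (List String)) × List (List String) :=
  let hits := (PySem.List.enumerate a 0).filter (fun p => pvIsOpA p.2)
  let op := hits.map (fun p => p.2)
  let s := hits.foldl (pvStepB a) ([], 0)
  let tail := PySem.List.slice a (some s.2) none
  (if tail ≠ [] then s.1 ++ [tail] else s.1, op)

-- ===== PRECONDITION & SPEC =====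
def Spec_readMat (a : List (List String)) (out : List (List (List String)) × List (List String)) : Prop := out = readMat_alt a
instance (a : List (List String)) (out : List (List (List String)) × List (List String)) : Decidable (Spec_readMat a out) := by unfold Spec_readMat; infer_instance

-- ===== CLAIM (what is proved, stated in full; the proofs are below) =====
def Claim_equal_readMat : Prop := ∀ (a : List (List String)), Dom_readMat a → Spec_readMat a (readMat a)

-- ===== LEMMAS AND PROOFS =====

-- slicing with both bounds at most the length ignores an appended element
lemma pv_slice_snoc {α : Type} (as : List α) (x : α) (p k : Int) (hp : 0 ≤ p)
    (hk0 : 0 ≤ k) (hk : k ≤ (as.length : Int)) :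
    PySem.List.slice (as ++ [x]) (some p) (some k) = PySem.List.slice as (some p) (some k) := by
  rw [PySem.List.slice_toNat _ hp hk0, PySem.List.slice_toNat _ hp hk0]
  by_cases h : p.toNat ≤ as.length
  · rw [List.drop_append_of_le_length h]
    exact List.take_append_of_le_length (by simp; omega)
  · have : k.toNat - p.toNat = 0 := by omega
    simp [this]

-- the fold of B over hits whose indices stay within `as` does not see an appended element
lemma pv_foldB_snoc_ext (as : List (List String)) (x : List String) :
    ∀ (hits : List (Int × List String)) (st : List (List (List String)) × Int),
      0 ≤ st.2 → (∀ p ∈ hits, 0 ≤ p.1 ∧ p.1 ≤ (as.length : Int)) →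
      hits.foldl (pvStepB (as ++ [x])) st = hits.foldl (pvStepB as) st := by
  intro hits
  induction hits with
  | nil => intro st _ _; rfl
  | cons p t ih =>
    intro st hst hp
    have h0 := hp p (by simp)
    simp only [List.foldl_cons]
    have : pvStepB (as ++ [x]) st p = pvStepB as st p := by
      unfold pvStepB
      rw [pv_slice_snoc as x st.2 p.1 hst h0.1 h0.2]
    rw [this]
    exact ih _ (by simp [pvStepB]; omega) (fun q hq => hp q (by simp [hq]))

lemma pv_hits_mem (a : List (List String)) :
    ∀ p ∈ (PySem.List.enumerate a 0).filter (fun p => pvIsOpA p.2),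
      0 ≤ p.1 ∧ p.1 < (a.length : Int) := by
  intro p hp
  have := List.of_mem_filter hp
  have hm := List.mem_of_mem_filter hp
  rw [PySem.List.mem_enumerate_iff] at hm
  obtain ⟨k, hk, rfl⟩ := hm
  constructor <;> simp <;> omega

lemma pv_hits_snoc (a : List (List String)) (x : List String) :
    (PySem.List.enumerate (a ++ [x]) 0).filter (fun p => pvIsOpA p.2) =
      (PySem.List.enumerate a 0).filter (fun p => pvIsOpA p.2) ++
        (if pvIsOpA x then [((a.length : Int), x)] else []) := by
  rw [PySem.List.enumerate_append, List.filter_append]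
  congr 1
  simp [PySem.List.enumerate_cons, PySem.List.enumerate_nil, List.filter]
  cases h : pvIsOpA x <;> simp

-- the main invariant relating B's (mat, prev) fold to A's (mat, op, line) fold
lemma pv_inv (a : List (List String)) :
    (((PySem.List.enumerate a 0).filter (fun p => pvIsOpA p.2)).foldl (pvStepB a) ([], 0)).1
        = (a.foldl pvStepA ([], [], [])).1 ∧
    0 ≤ (((PySem.List.enumerate a 0).filter (fun p => pvIsOpA p.2)).foldl (pvStepB a) ([], 0)).2 ∧
    (((PySem.List.enumerate a 0).filter (fun p => pvIsOpA p.2)).foldl (pvStepB a) ([], 0)).2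
        ≤ (a.length : Int) ∧
    PySem.List.slice a
        (some ((((PySem.List.enumerate a 0).filter (fun p => pvIsOpA p.2)).foldl (pvStepB a) ([], 0)).2)) none
        = (a.foldl pvStepA ([], [], [])).2.2 ∧
    ((PySem.List.enumerate a 0).filter (fun p => pvIsOpA p.2)).map (fun p => p.2)
        = (a.foldl pvStepA ([], [], [])).2.1 := by
  induction a using List.reverseRecOn with
  | nil => refine ⟨rfl, le_refl _, le_refl _, rfl, rfl⟩
  | append_singleton as x ih =>
    obtain ⟨h1, h2, h3, h4, h5⟩ := ih
    have hext : (((PySem.List.enumerate as 0).filter (fun p => pvIsOpA p.2)).foldl (pvStepB (as ++ [x])) (([], 0) : List (List (List String)) × Int))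
        = ((PySem.List.enumerate as 0).filter (fun p => pvIsOpA p.2)).foldl (pvStepB as) ([], 0) :=
      pv_foldB_snoc_ext as x _ _ (by norm_num)
        (fun p hp => ⟨(pv_hits_mem as p hp).1, le_of_lt (pv_hits_mem as p hp).2⟩)
    rw [pv_hits_snoc, List.foldl_append, List.foldl_append, hext]
    set sB := ((PySem.List.enumerate as 0).filter (fun p => pvIsOpA p.2)).foldl (pvStepB as) (([], 0) : List (List (List String)) × Int) with hsB
    set sA := as.foldl pvStepA ([], [], []) with hsA
    by_cases hop : pvIsOpA x
    · have hopA : pvIsOpA x := hop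
      simp only [hop, if_pos, List.foldl_cons, List.foldl_nil, List.map_append, List.map_cons, List.map_nil]
      have hslice : PySem.List.slice (as ++ [x]) (some sB.2) (some (as.length : Int))
          = sA.2.2 := by
        rw [pv_slice_snoc as x _ _ h2 (by positivity) (le_refl _)]
        rw [PySem.List.slice_toNat _ h2 (by positivity)]
        rw [PySem.List.slice_from _ h2] at h4
        rw [← h4]
        exact List.take_of_length_le (by simp)
      refine ⟨?_, ?_, ?_, ?_, ?_⟩
      · simp [pvStepB, pvStepA, hopA, hslice, h1]
      · simp [pvStepB]; positivity
      · simp [pvStepB]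
      · simp only [pvStepB, pvStepA, hopA, if_pos]
        have : (as.length : Int) + 1 = (((as ++ [x]).length : Nat) : Int) := by simp
        rw [this, PySem.List.slice_from_natCast]
        simp
      · simp [pvStepA, hopA, ← h5]
    · have hopA : ¬ pvIsOpA x := hop
      simp only [hop, if_neg, Bool.false_eq_true, not_false_iff, List.foldl_nil, List.append_nil]
      refine ⟨?_, h2, ?_, ?_, ?_⟩
      · simp [pvStepA, hopA, h1]
      · simp; omega
      · rw [PySem.List.slice_from _ h2] at h4 ⊢
        have hdd : (as ++ [x]).drop sB.2.toNat = as.drop sB.2.toNat ++ [x] :=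
          List.drop_append_of_le_length (by omega)
        rw [hdd]
        simp [pvStepA, hopA, h4]
      · simp [pvStepA, hopA, ← h5]

-- ===== VERDICT (by name: the statement is the Claim_ definition above) =====
theorem readMat_spec : Claim_equal_readMat := by
  intro a _
  unfold Spec_readMat readMat readMat_alt
  obtain ⟨h1, h2, h3, h4, h5⟩ := pv_inv a
  simp only [h1, h4, h5]
  by_cases hl : (a.foldl pvStepA ([], [], [])).2.2 = [] <;> simp [hl]
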